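-- pv_equiv track=rewrite | github.com/ncread/Advent-of-Code | 2015/day1/1.py | end_floor
-- ===== SOURCE A (Python) =====
-- def end_floor(data):
--     floor = 0
--     for i in data:
--         if i == '(':
--             floor += 1
--         elif i == ')':
--             floor -= 1
--     return floor
-- ===== SOURCE B (Python) =====
-- def end_floor(data):
--     return data.count('(') - data.count(')')
-- ===== Notes on version B (the rewrite author's own statement) =====
-- stated objective: simpler
-- what changed: Replaces the one-pass running-total loop over characters with a single expression subtracting two substring counts computed by str.count.
import Mathlib
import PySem

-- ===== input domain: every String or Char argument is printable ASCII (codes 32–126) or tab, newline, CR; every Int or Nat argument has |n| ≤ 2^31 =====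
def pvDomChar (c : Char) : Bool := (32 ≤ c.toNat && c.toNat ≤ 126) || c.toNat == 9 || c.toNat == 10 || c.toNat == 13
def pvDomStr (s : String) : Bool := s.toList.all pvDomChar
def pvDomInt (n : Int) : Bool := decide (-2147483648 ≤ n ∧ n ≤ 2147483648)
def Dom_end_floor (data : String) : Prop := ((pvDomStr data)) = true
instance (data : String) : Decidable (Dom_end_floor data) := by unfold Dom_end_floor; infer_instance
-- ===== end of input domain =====

-- B replaces A's running-total loop by a single expression subtracting two substring counts (simpler).


-- ===== PORT A =====
-- literal port of A: one pass, accumulator 'floor', branch on '(' then ')'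
def end_floor (data : String) : Int :=
  data.toList.foldl (fun floor i =>
    if i = '(' then floor + 1
    else if i = ')' then floor - 1
    else floor) 0

-- ===== PORT B =====
-- literal port of B: data.count('(') - data.count(')')
def end_floor_alt (data : String) : Int :=
  (PySem.Str.count data "(" : Int) - (PySem.Str.count data ")" : Int)

-- ===== PRECONDITION & SPEC =====
def Spec_end_floor (data : String) (out : Int) : Prop := out = end_floor_alt data
instance (data : String) (out : Int) : Decidable (Spec_end_floor data out) := by unfold Spec_end_floor; infer_instance

-- ===== CLAIM (what is proved, stated in full; the proofs are below) =====
def Claim_equal_end_floor : Prop := ∀ (data : String), Dom_end_floor data → Spec_end_floor data (end_floor data)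

-- ===== LEMMAS AND PROOFS =====

-- s.count(c) for a single-character needle is List.count
theorem count_go_singleton (c : Char) (l : List Char) (fuel acc : Nat)
    (h : l.length ≤ fuel) :
    PySem.Chars.count.go [c] fuel l acc = acc + l.count c := by
  induction l generalizing fuel acc with
  | nil => cases fuel <;> simp [PySem.Chars.count.go]
  | cons x t ih =>
    cases fuel with
    | zero => simp at h
    | succ n =>
      simp only [PySem.Chars.count.go]
      by_cases hx : x = c
      · subst hx
        rw [if_pos (by simp [List.isPrefixOf])]
        simp only [List.length_singleton, List.drop_one, List.tail_cons]
        rw [ih n (acc + 1) (by simpa using h)]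
        simp
        omega
      · rw [if_neg (by simp [List.isPrefixOf]; exact fun h' => hx h'.symm)]
        rw [ih n acc (by simpa using h)]
        simp [hx]

theorem chars_count_singleton (s : List Char) (c : Char) :
    PySem.Chars.count s [c] = s.count c := by
  simp [PySem.Chars.count, List.isEmpty]
  simpa using count_go_singleton c s s.length 0 le_rfl

-- A's fold, generalized over the accumulator
theorem fold_eq (l : List Char) (a : Int) :
    l.foldl (fun floor i =>
      if i = '(' then floor + 1
      else if i = ')' then floor - 1
      else floor) a = a + (l.count '(' : Int) - (l.count ')' : Int) := by
  induction l generalizing a with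
  | nil => simp
  | cons x t ih =>
    simp only [List.foldl_cons, ih]
    by_cases h1 : x = '('
    · subst h1; simp; ring
    · by_cases h2 : x = ')'
      · subst h2; simp [h1]; ring
      · simp [h1, h2]

-- ===== VERDICT (by name: the statement is the Claim_ definition above) =====
theorem end_floor_spec : Claim_equal_end_floor := by
  intro data _
  unfold Spec_end_floor end_floor end_floor_alt
  rw [fold_eq]
  have h1 := chars_count_singleton data.toList '('
  have h2 := chars_count_singleton data.toList ')'
  simp [PySem.Str.count] at *
  omega
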